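-- pv_equiv track=rewrite | github.com/SalilSavarin/processing-pandas-csv-files | task_2/main.py | max_length_2
-- ===== SOURCE A (Python) =====
-- def max_length_2(some_list: list) -> int:
--     """
--     Функция для подсчета длины максимальной последовательности, положительных чисел в списке.
--     :param some_list: список с int
--     :return: int максимальная длинна последовательности
--     """
--     length_count = 0
--     max_length_count = 0
--     for elem in some_list:
--         if elem >= 1:
--             length_count += 1
--         else:
--             if length_count > 0:
--                 max_length_count = max(max_length_count, length_count)
--                 length_count = 0
--     return max(max_length_count, length_count)
-- ===== SOURCE B (Python) =====
-- def max_length_2(some_list: list) -> int: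
--     """Longest run of consecutive elements >= 1, by run-decomposition with two indices."""
--     best = 0
--     i, n = 0, len(some_list)
--     while i < n:
--         if some_list[i] >= 1:
--             j = i
--             while j < n and some_list[j] >= 1:
--                 j += 1
--             best = max(best, j - i)
--             i = j
--         else:
--             i += 1
--     return best
-- ===== Notes on version B (the rewrite author's own statement) =====
-- stated objective: alternative
-- what changed: Replaces A's running-counter-with-reset fold by a two-index run decomposition: an inner scan measures each maximal run of elements >= 1 at once, and best is updated once per run.
import Mathlib
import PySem

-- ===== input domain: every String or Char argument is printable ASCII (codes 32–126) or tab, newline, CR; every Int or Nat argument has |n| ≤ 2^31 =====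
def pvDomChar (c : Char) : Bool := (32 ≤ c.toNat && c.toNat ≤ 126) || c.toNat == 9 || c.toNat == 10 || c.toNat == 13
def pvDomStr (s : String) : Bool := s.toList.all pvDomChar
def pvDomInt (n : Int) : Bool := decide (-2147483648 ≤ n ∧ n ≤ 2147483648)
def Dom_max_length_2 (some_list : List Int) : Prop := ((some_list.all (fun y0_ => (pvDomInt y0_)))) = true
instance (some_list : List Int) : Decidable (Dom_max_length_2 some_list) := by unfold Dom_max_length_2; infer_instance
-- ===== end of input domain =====

-- B replaces A's running-counter-with-reset fold by a two-index run decomposition (an inner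
-- scan measures each maximal run of elements ≥ 1 at once); same O(n) cost, alternative structure.

-- ===== PORT A =====
-- A: running counter, reset on non-positive element, max at the end (fold over the state).
def aStep (s : Int × Int) (e : Int) : Int × Int :=
  if 1 ≤ e then (s.1 + 1, s.2)
  else if 0 < s.1 then (0, max s.2 s.1) else s

def max_length_2 (some_list : List Int) : Int :=
  let s := some_list.foldl aStep (0, 0)
  max s.2 s.1

-- ===== PORT B =====
-- B: run decomposition — measure each maximal run of elements ≥ 1 at once.
-- bRun returns (length of leading ≥1-run, remainder of the list) (the inner while loop).
def bRun : List Int → Int × List Int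
  | [] => (0, [])
  | x :: xs => if 1 ≤ x then let p := bRun xs; (p.1 + 1, p.2) else (0, x :: xs)

theorem bRun_len : ∀ l : List Int, (bRun l).2.length ≤ l.length := by
  intro l; induction l with
  | nil => simp [bRun]
  | cons x xs ih => by_cases h : 1 ≤ x <;> simp [bRun, h] <;> omega

def bGo (best : Int) : List Int → Int
  | [] => best
  | x :: xs =>
    if 1 ≤ x then
      let p := bRun (x :: xs)
      bGo (max best p.1) p.2
    else bGo best xs
termination_by l => l.length
decreasing_by
  · have h := bRun_len xs
    simp only [bRun, if_pos ‹1 ≤ x›, List.length_cons]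
    omega
  · simp

def max_length_2_alt (some_list : List Int) : Int := bGo 0 some_list

-- ===== PRECONDITION & SPEC =====
def Spec_max_length_2 (some_list : List Int) (out : Int) : Prop := out = max_length_2_alt some_list
instance (some_list : List Int) (out : Int) : Decidable (Spec_max_length_2 some_list out) := by unfold Spec_max_length_2; infer_instance

-- ===== CLAIM (what is proved, stated in full; the proofs are below) =====
def Claim_equal_max_length_2 : Prop := ∀ (some_list : List Int), Dom_max_length_2 some_list → Spec_max_length_2 some_list (max_length_2 some_list)

-- ===== LEMMAS AND PROOFS =====

theorem bRun_nonneg : ∀ l : List Int, 0 ≤ (bRun l).1 := by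
  intro l; induction l with
  | nil => simp [bRun]
  | cons x xs ih => by_cases h : 1 ≤ x <;> simp [bRun, h] <;> omega

theorem bRun_pos (x : Int) (xs : List Int) (h : 1 ≤ x) : 1 ≤ (bRun (x :: xs)).1 := by
  have := bRun_nonneg xs
  simp [bRun, h]; omega

theorem bRun_rest (l : List Int) :
    (bRun l).2 = [] ∨ ∃ y ys, (bRun l).2 = y :: ys ∧ ¬ 1 ≤ y := by
  induction l with
  | nil => left; simp [bRun]
  | cons x xs ih =>
    by_cases h : 1 ≤ x
    · simpa [bRun, h] using ih
    · right; exact ⟨x, xs, by simp [bRun, h], h⟩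

-- the A-loop over a list equals the A-loop over the tail after the leading ≥1-run,
-- with the run's length absorbed into the running counter
theorem foldl_bRun : ∀ (l : List Int) (lc mlc : Int),
    l.foldl aStep (lc, mlc) = (bRun l).2.foldl aStep (lc + (bRun l).1, mlc) := by
  intro l; induction l with
  | nil => intro lc mlc; simp [bRun]
  | cons x xs ih =>
    intro lc mlc
    by_cases h : 1 ≤ x
    · have h1 : lc + 1 + (bRun xs).1 = lc + ((bRun xs).1 + 1) := by ring
      simp [bRun, h, List.foldl_cons, aStep, ih (lc + 1) mlc, h1]
    · simp [bRun, h]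

theorem main_inv : ∀ (n : Nat) (l : List Int), l.length ≤ n → ∀ mlc : Int, 0 ≤ mlc →
    max (l.foldl aStep (0, mlc)).2 (l.foldl aStep (0, mlc)).1 = bGo mlc l := by
  intro n
  induction n with
  | zero =>
    intro l hl mlc hm
    have : l = [] := List.eq_nil_of_length_eq_zero (Nat.le_zero.mp hl)
    subst this; simp [bGo]; omega
  | succ n ih =>
    intro l hl mlc hm
    cases l with
    | nil => simp [bGo]; omega
    | cons x xs =>
      by_cases h : 1 ≤ x
      · have hrun := bRun_pos x xs h
        have hlen := bRun_len (x :: xs)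
        have hG := foldl_bRun (x :: xs) 0 mlc
        rw [zero_add] at hG
        rcases bRun_rest (x :: xs) with hr | ⟨y, ys, hr, hy⟩
        · rw [hG, hr]
          simp only [List.foldl_nil]
          rw [bGo, if_pos h]; simp only [hr, bGo]
        · have hstep : aStep ((bRun (x :: xs)).1, mlc) y = (0, max mlc (bRun (x :: xs)).1) := by
            simp [aStep, hy]; omega
          have hys : ys.length ≤ n := by
            rw [hr] at hlen; simp at hlen hl ⊢; omega
          rw [hG, hr]
          simp only [List.foldl_cons, hstep]
          rw [ih ys hys (max mlc (bRun (x :: xs)).1) (by omega)]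
          rw [bGo, if_pos h]; simp only [hr]; rw [bGo, if_neg hy]
      · have hstep : aStep (0, mlc) x = (0, mlc) := by simp [aStep, h]
        have hxs : xs.length ≤ n := by simp at hl; omega
        rw [List.foldl_cons, hstep, ih xs hxs mlc hm, bGo, if_neg h]

-- ===== VERDICT (by name: the statement is the Claim_ definition above) =====
theorem max_length_2_spec : Claim_equal_max_length_2 := by
  intro l _
  unfold Spec_max_length_2 max_length_2 max_length_2_alt
  exact main_inv l.length l le_rfl 0 le_rfl
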